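-- pv_equiv track=rewrite | github.com/FrewtyPebbles/Python-RISC-V-CPU-Emulator | src/memory.py | dec_to_bin_signed
-- ===== SOURCE A (Python) =====
-- from typing import Iterable, Literal
--
-- Bit = Literal[0, 1]
--
-- def dec_to_bin_signed(value: int, size: int) -> tuple[Bit, ...]:
--     min_val = -(1 << (size - 1))
--     max_val = (1 << (size - 1)) - 1
--     if not (min_val <= value <= max_val):
--         raise ValueError(f"Value {value} cannot be represented in {size} bits.")
--
--     if value < 0:
--         value = (1 << size) + value
--
--     bits = []
--     for _ in range(size):
--         bits.append(int(bool(value & 1)))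
--         value >>= 1
--     return tuple(bits)
-- ===== SOURCE B (Python) =====
-- def dec_to_bin_signed(value: int, size: int):
--     min_val = -(1 << (size - 1))
--     max_val = (1 << (size - 1)) - 1
--     if not (min_val <= value <= max_val):
--         raise ValueError(f"Value {value} cannot be represented in {size} bits.")
--
--     u = value % (1 << size)
--     s = format(u, f"0{size}b")
--     return tuple(int(c) for c in reversed(s))
-- ===== Notes on version B (the rewrite author's own statement) =====
-- stated objective: simpler
-- what changed: A's size-iteration shift-and-mask loop appending one bit per step is replaced by a single modular reduction (value % (1 << size)) followed by one binary format call, reversed to LSB-first.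
import Mathlib
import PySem

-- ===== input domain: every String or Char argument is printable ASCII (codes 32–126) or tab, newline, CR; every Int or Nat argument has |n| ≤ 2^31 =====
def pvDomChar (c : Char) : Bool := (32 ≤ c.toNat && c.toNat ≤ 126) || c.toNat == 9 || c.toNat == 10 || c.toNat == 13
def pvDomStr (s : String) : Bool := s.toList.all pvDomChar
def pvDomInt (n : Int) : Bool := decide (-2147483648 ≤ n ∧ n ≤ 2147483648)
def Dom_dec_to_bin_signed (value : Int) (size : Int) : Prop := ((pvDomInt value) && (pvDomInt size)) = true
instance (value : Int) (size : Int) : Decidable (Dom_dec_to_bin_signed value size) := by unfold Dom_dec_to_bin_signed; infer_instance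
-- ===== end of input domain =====

-- B replaces A's size-step shift-and-mask loop by one modular reduction plus a binary
-- format of the unsigned value, reversed to LSB-first (objective: simpler).
-- Both raise ValueError outside the representable range; those inputs are outside Pre_.

-- ===== PORT A =====
-- 1 << (size-1) is 2^(size-1); inside Pre_ we have 1 ≤ size so .toNat is exact.
-- int(bool(value & 1)) = value & 1 (it is 0 or 1); value >>= 1 is floor division by 2.
def dec_to_bin_signed (value : Int) (size : Int) : List Int :=
  let min_val : Int := -(2 ^ (size - 1).toNat)
  let max_val : Int := 2 ^ (size - 1).toNat - 1
  if ¬ (min_val ≤ value ∧ value ≤ max_val) then []  -- Python raises ValueError here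
  else
    let v : Int := if value < 0 then 2 ^ size.toNat + value else value
    ((List.range size.toNat).foldl
      (fun (st : List Int × Int) _ =>
        (st.1 ++ [PySem.Int.band st.2 1], PySem.Int.floordiv st.2 2))
      ([], v)).1

-- ===== PORT B =====
-- hand port of format(u, "b"): binary digits of u, MSB first, [] for 0 (caller special-cases 0)
def pvBinChars (n : Nat) : List Char :=
  if h : n = 0 then []
  else pvBinChars (n / 2) ++ [if n % 2 = 1 then '1' else '0']
decreasing_by exact Nat.div_lt_self (Nat.pos_of_ne_zero h) (by omega)

def dec_to_bin_signed_alt (value : Int) (size : Int) : List Int :=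
  let min_val : Int := -(2 ^ (size - 1).toNat)
  let max_val : Int := 2 ^ (size - 1).toNat - 1
  if ¬ (min_val ≤ value ∧ value ≤ max_val) then []  -- Python raises ValueError here
  else
    let u : Int := PySem.Int.mod value (2 ^ size.toNat)  -- value % (1 << size)
    -- s = format(u, f"0{size}b") : binary text, zero-padded on the left to width size
    let raw : List Char := if u = 0 then ['0'] else pvBinChars u.toNat
    let s : List Char := List.replicate (size.toNat - raw.length) '0' ++ raw
    (s.reverse).map (fun c => ((c.toNat : Int) - 48))  -- int(c) for c in reversed(s)

-- ===== PRECONDITION & SPEC =====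
-- Pre_ excludes exactly the inputs where Python A raises ValueError: size ≤ 0
-- (negative shift count) or value outside the signed size-bit range.
def Pre_dec_to_bin_signed (value : Int) (size : Int) : Prop :=
  1 ≤ size ∧ -(2 ^ (size - 1).toNat) ≤ value ∧ value ≤ 2 ^ (size - 1).toNat - 1
instance (value : Int) (size : Int) : Decidable (Pre_dec_to_bin_signed value size) := by
  unfold Pre_dec_to_bin_signed; infer_instance

def pvWitness_dec_to_bin_signed : Int × Int := (-3, 4)

def Spec_dec_to_bin_signed (value : Int) (size : Int) (out : List Int) : Prop :=
  out = dec_to_bin_signed_alt value size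
instance (value : Int) (size : Int) (out : List Int) : Decidable (Spec_dec_to_bin_signed value size out) := by
  unfold Spec_dec_to_bin_signed; infer_instance

-- ===== CLAIM (what is proved, stated in full; the proofs are below) =====
def Claim_equal_dec_to_bin_signed : Prop := ∀ (value : Int) (size : Int), Dom_dec_to_bin_signed value size → Pre_dec_to_bin_signed value size → Spec_dec_to_bin_signed value size (dec_to_bin_signed value size)

-- ===== LEMMAS AND PROOFS =====

-- canonical LSB-first bit list of a natural number, width k
def bitsN (n : Nat) (k : Nat) : List Int :=
  (List.range k).map (fun i => ((n / 2 ^ i % 2 : Nat) : Int))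

theorem bitsN_succ (n k : Nat) :
    bitsN n (k + 1) = ((n % 2 : Nat) : Int) :: bitsN (n / 2) k := by
  unfold bitsN
  rw [List.range_succ_eq_map, List.map_cons, List.map_map]
  congr 1
  · simp
  · apply List.map_congr_left
    intro a _
    simp only [Function.comp_apply]
    rw [Nat.div_div_eq_div_mul, pow_succ']

theorem bitsN_zero_left (k : Nat) : bitsN 0 k = List.replicate k 0 := by
  unfold bitsN
  induction k with
  | zero => simp
  | succ k ih => rw [List.range_succ, List.map_append, ih, List.replicate_succ']; simp

theorem foldA (k : Nat) : ∀ (acc : List Int) (v : Nat),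
    ((List.range k).foldl
      (fun (st : List Int × Int) _ =>
        (st.1 ++ [PySem.Int.band st.2 1], PySem.Int.floordiv st.2 2))
      (acc, (v : Int))).1 = acc ++ bitsN v k := by
  induction k with
  | zero => intro acc v; simp [bitsN]
  | succ k ih =>
    intro acc v
    rw [List.range_succ_eq_map, List.foldl_cons, List.foldl_map]
    have hb : PySem.Int.band (v : Int) 1 = ((v % 2 : Nat) : Int) := by
      have := PySem.Int.band_natCast v 1
      simpa [Nat.and_one_is_mod] using this
    have hd : PySem.Int.floordiv (v : Int) 2 = ((v / 2 : Nat) : Int) := by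
      exact_mod_cast PySem.Int.floordiv_natCast v 2
    rw [hb, hd, ih, bitsN_succ, List.append_assoc]
    rfl

theorem pvBinChars_spec : ∀ n : Nat,
    (pvBinChars n).reverse.map (fun c => ((c.toNat : Int) - 48)) =
      bitsN n (pvBinChars n).length ∧ n < 2 ^ (pvBinChars n).length := by
  intro n
  induction n using Nat.strong_induction_on with
  | _ n ih =>
    by_cases h : n = 0
    · subst h
      rw [pvBinChars]
      simp [bitsN]
    · obtain ⟨ih1, ih2⟩ := ih (n / 2) (Nat.div_lt_self (Nat.pos_of_ne_zero h) (by omega))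
      rw [pvBinChars]
      simp only [h, dite_false, List.reverse_append, List.reverse_cons,
        List.reverse_nil, List.nil_append, List.singleton_append, List.map_cons,
        List.length_append, List.length_singleton]
      constructor
      · rw [ih1, bitsN_succ]
        congr 1
        rcases Nat.mod_two_eq_zero_or_one n with h2 | h2 <;> simp [h2]
      · have h3 : n < 2 * (n / 2) + 2 := by omega
        calc n < 2 * (n / 2) + 2 := h3
          _ ≤ 2 * 2 ^ (pvBinChars (n/2)).length := by omega
          _ = 2 ^ ((pvBinChars (n/2)).length + 1) := by ring

theorem pvBinChars_len_le : ∀ (k n : Nat), n < 2 ^ k → (pvBinChars n).length ≤ k := by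
  intro k
  induction k with
  | zero =>
    intro n hn
    interval_cases n
    rw [pvBinChars]; simp
  | succ k ih =>
    intro n hn
    by_cases h : n = 0
    · subst h; rw [pvBinChars]; simp
    · rw [pvBinChars]
      simp only [h, dite_false, List.length_append, List.length_singleton]
      have : n / 2 < 2 ^ k := by
        have := Nat.pow_succ 2 k
        omega
      have := ih (n / 2) this
      omega

theorem bitsN_ext (n j m : Nat) (h : n < 2 ^ j) :
    bitsN n (j + m) = bitsN n j ++ List.replicate m 0 := by
  induction m with
  | zero => simp
  | succ m ihm =>
    have : j + (m + 1) = (j + m) + 1 := by omega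
    rw [this]
    unfold bitsN
    rw [List.range_succ, List.map_append, ← bitsN, ← bitsN, ihm]
    have hz : n / 2 ^ (j + m) = 0 := by
      apply Nat.div_eq_of_lt
      calc n < 2 ^ j := h
        _ ≤ 2 ^ (j + m) := Nat.pow_le_pow_right (by omega) (by omega)
    have h0 : ((n / 2 ^ (j + m) % 2 : Nat) : Int) = 0 := by rw [hz]; rfl
    rw [List.replicate_succ', ← List.append_assoc]
    congr 1
    simp only [List.map_cons, List.map_nil, h0]

-- ===== VERDICT (by name: the statement is the Claim_ definition above) =====
theorem dec_to_bin_signed_spec : Claim_equal_dec_to_bin_signed := by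
  intro value size _ hpre
  obtain ⟨hs, hlo, hhi⟩ := hpre
  unfold Spec_dec_to_bin_signed dec_to_bin_signed dec_to_bin_signed_alt
  dsimp only
  set j : Nat := (size - 1).toNat with hj
  set k : Nat := size.toNat with hk
  have hkj : k = j + 1 := by omega
  have hrange : ¬ ¬ (-(2 ^ j : Int) ≤ value ∧ value ≤ 2 ^ j - 1) :=
    fun hc => hc ⟨hlo, hhi⟩
  rw [if_neg hrange, if_neg hrange]
  have hjk : (2 : Int) ^ j < 2 ^ k := by
    have h2 : (2 : Int) ^ k = 2 ^ j * 2 := by rw [hkj, pow_succ]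
    have hp : (0 : Int) < 2 ^ j := by positivity
    omega
  have hpow : (0:Int) < 2 ^ k := by positivity
  -- the unsigned value both sides work with
  set v : Int := if value < 0 then 2 ^ k + value else value with hv
  have hv0 : 0 ≤ v := by
    rw [hv]; split_ifs with h <;> omega
  have hvlt : v < 2 ^ k := by
    rw [hv]; split_ifs with h <;> omega
  -- B's u equals A's v
  have hu : PySem.Int.mod value (2 ^ k) = v := by
    rw [PySem.Int.mod_eq_emod_of_pos hpow]
    rw [hv]; split_ifs with h
    · have : value % (2 ^ k) = (2 ^ k + value) % (2 ^ k) := by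
        rw [Int.add_comm]
        simpa using Int.add_mul_emod_self_left (a := value) (b := 2 ^ k) (c := 1)
      rw [this, Int.emod_eq_of_lt (by omega) (by omega)]
    · exact Int.emod_eq_of_lt (by omega) (by omega)
  rw [hu]
  -- rewrite v as a Nat cast
  have hvn : v = ((v.toNat : Nat) : Int) := (Int.toNat_of_nonneg hv0).symm
  set n : Nat := v.toNat with hn
  have hnlt : n < 2 ^ k := by
    have h1 : (n : Int) < 2 ^ k := by rw [hn, Int.toNat_of_nonneg hv0]; exact hvlt
    exact_mod_cast h1
  -- A side
  rw [hvn, foldA, List.nil_append]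
  simp only [Nat.cast_eq_zero]  -- (↑n : Int) = 0 ↔ n = 0
  -- B side
  by_cases h0 : n = 0
  · rw [if_pos h0]
    rw [h0]
    simp only [List.length_singleton, List.reverse_append, List.map_append,
      List.reverse_replicate, List.map_replicate]
    rw [bitsN_zero_left]
    have hk1 : 1 ≤ k := by omega
    have : k = 1 + (k - 1) := by omega
    rw [this, List.replicate_add]
    simp
  · rw [if_neg h0]
    obtain ⟨hspec, hlt⟩ := pvBinChars_spec n
    have hlen : (pvBinChars n).length ≤ k := pvBinChars_len_le k n hnlt
    rw [List.reverse_append, List.map_append, hspec, List.reverse_replicate,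
      List.map_replicate]
    have : k = (pvBinChars n).length + (k - (pvBinChars n).length) := by omega
    rw [this, bitsN_ext n _ _ hlt]
    simp
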